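-- pv_equiv track=rewrite | github.com/FatouBinetou456/mineral_classification | programme_test.py | map_cles_aux_categories
-- ===== SOURCE A (Python) =====
-- def map_cles_aux_categories(resultat_cles):
--     categories = {
--         "Sulfures-Sulfosels": ["Sulfure-Sulfosels1", "Sulfure-Sulfosels2", "Sulfure-Sulfosels3", "Sulfure-Sulfosels4", "Sulfure-Sulfosels5"],
--         "Halogenures": ["Halogenure1", "Halogenure2", "Halogenure3", "Halogenure4"],
--         "Oxydes-Hydroxydes": ["Oxydes-Hydroxydes"],
--         "Carbonates": ["Carbonates", "Borates", "Nitrates"],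
--         "Sulfates": ["Sulfates", "Chromates", "Molybdates", "Tungstates"],
--         "Phosphates": ["Phosphates", "Arseniates", "Vanadates", "Antimoniates"],
--         "Silicates": ["Silicates"],
--         "Elements-Organiques": ["Elements-Organiques"]
--     }
--
--     categories_trouvees = []
--
--     for categorie, cles in categories.items():
--         if any(cle in resultat_cles for cle in cles):
--             categories_trouvees.append(categorie)
--
--     return categories_trouvees if categories_trouvees else None
-- ===== SOURCE B (Python) =====
-- # Flat hard-coded (cle, categorie) index scanned once, deduplicating against the
-- # result list itself; preserves A's category order and first-hit semantics.
-- PAIRES = [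
--     ("Sulfure-Sulfosels1", "Sulfures-Sulfosels"),
--     ("Sulfure-Sulfosels2", "Sulfures-Sulfosels"),
--     ("Sulfure-Sulfosels3", "Sulfures-Sulfosels"),
--     ("Sulfure-Sulfosels4", "Sulfures-Sulfosels"),
--     ("Sulfure-Sulfosels5", "Sulfures-Sulfosels"),
--     ("Halogenure1", "Halogenures"),
--     ("Halogenure2", "Halogenures"),
--     ("Halogenure3", "Halogenures"),
--     ("Halogenure4", "Halogenures"),
--     ("Oxydes-Hydroxydes", "Oxydes-Hydroxydes"),
--     ("Carbonates", "Carbonates"),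
--     ("Borates", "Carbonates"),
--     ("Nitrates", "Carbonates"),
--     ("Sulfates", "Sulfates"),
--     ("Chromates", "Sulfates"),
--     ("Molybdates", "Sulfates"),
--     ("Tungstates", "Sulfates"),
--     ("Phosphates", "Phosphates"),
--     ("Arseniates", "Phosphates"),
--     ("Vanadates", "Phosphates"),
--     ("Antimoniates", "Phosphates"),
--     ("Silicates", "Silicates"),
--     ("Elements-Organiques", "Elements-Organiques"),
-- ]
--
--
-- def map_cles_aux_categories(resultat_cles):
--     resultat = []
--     for cle, categorie in PAIRES:
--         if cle in resultat_cles and categorie not in resultat: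
--             resultat.append(categorie)
--     return resultat or None
-- ===== Notes on version B (the rewrite author's own statement) =====
-- stated objective: alternative
-- what changed: Replaces the nested dict-of-lists with any()-per-category by a single flat hard-coded (cle, categorie) index scanned in one loop that deduplicates categories against the result list itself.
import Mathlib
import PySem

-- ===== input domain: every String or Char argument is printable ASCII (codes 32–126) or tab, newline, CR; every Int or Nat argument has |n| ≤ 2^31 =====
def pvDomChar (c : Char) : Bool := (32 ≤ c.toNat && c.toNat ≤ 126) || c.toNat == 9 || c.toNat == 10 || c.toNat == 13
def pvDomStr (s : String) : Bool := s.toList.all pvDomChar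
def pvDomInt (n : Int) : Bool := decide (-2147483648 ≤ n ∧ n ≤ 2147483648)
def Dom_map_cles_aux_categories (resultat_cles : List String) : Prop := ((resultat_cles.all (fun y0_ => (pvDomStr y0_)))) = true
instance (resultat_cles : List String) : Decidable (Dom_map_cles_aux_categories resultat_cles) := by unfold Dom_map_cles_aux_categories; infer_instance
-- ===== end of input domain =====

-- B scans a single flat hard-coded (cle, categorie) index recursively, deduplicating
-- against the result list itself, instead of A's dict-of-lists with an any() per
-- category; same return value (objective: alternative decomposition).


-- ===== PORT A =====
-- the hard-coded dict literal, as an association list in insertion order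
def pvCategoriesA : List (String × List String) :=
  [("Sulfures-Sulfosels", ["Sulfure-Sulfosels1", "Sulfure-Sulfosels2", "Sulfure-Sulfosels3", "Sulfure-Sulfosels4", "Sulfure-Sulfosels5"]),
   ("Halogenures", ["Halogenure1", "Halogenure2", "Halogenure3", "Halogenure4"]),
   ("Oxydes-Hydroxydes", ["Oxydes-Hydroxydes"]),
   ("Carbonates", ["Carbonates", "Borates", "Nitrates"]),
   ("Sulfates", ["Sulfates", "Chromates", "Molybdates", "Tungstates"]),
   ("Phosphates", ["Phosphates", "Arseniates", "Vanadates", "Antimoniates"]),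
   ("Silicates", ["Silicates"]),
   ("Elements-Organiques", ["Elements-Organiques"])]

def map_cles_aux_categories (resultat_cles : List String) : Option (List String) :=
  let categories_trouvees :=
    pvCategoriesA.foldl
      (fun acc p => if p.2.any (fun cle => resultat_cles.contains cle) then acc ++ [p.1] else acc) []
  if categories_trouvees.isEmpty then none else some categories_trouvees

-- ===== PORT B =====
-- B's module-level flat (cle, categorie) index, a plain literal
def pvPaires : List (String × String) :=
  [("Sulfure-Sulfosels1", "Sulfures-Sulfosels"),
   ("Sulfure-Sulfosels2", "Sulfures-Sulfosels"),
   ("Sulfure-Sulfosels3", "Sulfures-Sulfosels"),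
   ("Sulfure-Sulfosels4", "Sulfures-Sulfosels"),
   ("Sulfure-Sulfosels5", "Sulfures-Sulfosels"),
   ("Halogenure1", "Halogenures"),
   ("Halogenure2", "Halogenures"),
   ("Halogenure3", "Halogenures"),
   ("Halogenure4", "Halogenures"),
   ("Oxydes-Hydroxydes", "Oxydes-Hydroxydes"),
   ("Carbonates", "Carbonates"),
   ("Borates", "Carbonates"),
   ("Nitrates", "Carbonates"),
   ("Sulfates", "Sulfates"),
   ("Chromates", "Sulfates"),
   ("Molybdates", "Sulfates"),
   ("Tungstates", "Sulfates"),
   ("Phosphates", "Phosphates"),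
   ("Arseniates", "Phosphates"),
   ("Vanadates", "Phosphates"),
   ("Antimoniates", "Phosphates"),
   ("Silicates", "Silicates"),
   ("Elements-Organiques", "Elements-Organiques")]

-- B's single loop, written as structural recursion over the flat index
def pvScan (resultat_cles : List String) : List (String × String) → List String → List String
  | [], resultat => resultat
  | (cle, categorie) :: rest, resultat =>
    if resultat_cles.contains cle && !(resultat.contains categorie)
    then pvScan resultat_cles rest (resultat ++ [categorie])
    else pvScan resultat_cles rest resultat

def map_cles_aux_categories_alt (resultat_cles : List String) : Option (List String) :=
  match pvScan resultat_cles pvPaires [] with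
  | [] => none
  | resultat => some resultat

-- ===== PRECONDITION & SPEC =====
def Spec_map_cles_aux_categories (resultat_cles : List String) (out : Option (List String)) : Prop := out = map_cles_aux_categories_alt resultat_cles
instance (resultat_cles : List String) (out : Option (List String)) : Decidable (Spec_map_cles_aux_categories resultat_cles out) := by unfold Spec_map_cles_aux_categories; infer_instance

-- ===== CLAIM (what is proved, stated in full; the proofs are below) =====
def Claim_equal_map_cles_aux_categories : Prop := ∀ (resultat_cles : List String), Dom_map_cles_aux_categories resultat_cles → Spec_map_cles_aux_categories resultat_cles (map_cles_aux_categories resultat_cles)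

-- ===== LEMMAS AND PROOFS =====

-- the flat index is the flattening of A's table
def pvFlatten (tbl : List (String × List String)) : List (String × String) :=
  tbl.flatMap (fun p => p.2.map (fun k => (k, p.1)))

theorem pvScan_append (L : List String) (xs ys : List (String × String)) :
    ∀ res, pvScan L (xs ++ ys) res = pvScan L ys (pvScan L xs res) := by
  induction xs with
  | nil => intro res; rfl
  | cons p xs ih =>
    intro res
    obtain ⟨cle, cat⟩ := p
    simp only [List.cons_append, pvScan]
    split <;> exact ih _

-- once a categorie is already in the result, its whole block is skipped
theorem pvScan_skip (L : List String) (ks : List String) (c : String)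
    (res : List String) (h : res.contains c = true) :
    pvScan L (ks.map (fun k => (k, c))) res = res := by
  induction ks with
  | nil => rfl
  | cons k ks ih =>
    simp only [List.map_cons, pvScan, h, Bool.not_true, Bool.and_false,
      Bool.false_eq_true, if_false]
    exact ih

-- one whole block behaves like A's any()-test
theorem pvScan_block (L : List String) (ks : List String) (c : String)
    (res : List String) (h : res.contains c = false) :
    pvScan L (ks.map (fun k => (k, c))) res =
      if ks.any (fun k => L.contains k) then res ++ [c] else res := by
  induction ks with
  | nil => rfl
  | cons k ks ih =>
    rcases Bool.eq_false_or_eq_true (L.contains k) with hk | hk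
    · simp only [List.map_cons, List.any_cons, pvScan, h, hk, Bool.not_false,
        Bool.and_true, reduceIte, Bool.true_or]
      exact pvScan_skip L ks c (res ++ [c]) (by simp)
    · simp only [List.map_cons, List.any_cons, pvScan, h, hk, Bool.not_false,
        Bool.and_true, Bool.false_eq_true, reduceIte, Bool.false_or]
      exact ih

-- B's scan over the flattening of any table with distinct category names
theorem pvScan_table (L : List String) (tbl : List (String × List String)) :
    ∀ (res : List String),
    (tbl.map Prod.fst).Nodup → (∀ c ∈ tbl.map Prod.fst, c ∉ res) →
    pvScan L (pvFlatten tbl) res =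
      res ++ (tbl.filter (fun p => p.2.any (fun k => L.contains k))).map Prod.fst := by
  induction tbl with
  | nil => intro res _ _; simp [pvFlatten, pvScan]
  | cons p tbl ih =>
    intro res hnd hres
    simp only [pvFlatten, List.flatMap_cons] at *
    rw [pvScan_append]
    have hp : res.contains p.1 = false := by
      simp only [List.contains_eq_mem, decide_eq_false_iff_not]
      exact hres p.1 (by simp)
    rw [pvScan_block L p.2 p.1 res hp]
    simp only [List.map_cons, List.nodup_cons] at hnd
    rcases Bool.eq_false_or_eq_true (p.2.any (fun k => L.contains k)) with hany | hany
    · simp only [List.filter_cons, hany, reduceIte, List.map_cons]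
      rw [ih (res ++ [p.1]) hnd.2
        (by intro c hc hmem
            rcases List.mem_append.mp hmem with h1 | h1
            · exact hres c (by simp [hc]) h1
            · exact hnd.1 ((List.mem_singleton.mp h1) ▸ hc))]
      simp
    · simp only [List.filter_cons, hany, Bool.false_eq_true, reduceIte]
      exact ih res hnd.2 (fun c hc => hres c (by simp [hc]))

-- A's loop is the same filter-map
theorem pvFoldA (L : List String) (tbl : List (String × List String)) :
    ∀ (acc : List String),
    tbl.foldl (fun acc p => if p.2.any (fun cle => L.contains cle) then acc ++ [p.1] else acc) acc =
      acc ++ (tbl.filter (fun p => p.2.any (fun k => L.contains k))).map Prod.fst := by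
  induction tbl with
  | nil => intro acc; simp
  | cons p tbl ih =>
    intro acc
    rcases Bool.eq_false_or_eq_true (p.2.any (fun k => L.contains k)) with hany | hany
    · simp only [List.foldl_cons, List.filter_cons, hany, reduceIte, List.map_cons, ih]
      simp
    · simp only [List.foldl_cons, List.filter_cons, hany, Bool.false_eq_true, reduceIte]
      exact ih acc

-- B's literal index is exactly the flattening of A's table
theorem pvPaires_eq : pvPaires = pvFlatten pvCategoriesA := by decide

-- ===== VERDICT (by name: the statement is the Claim_ definition above) =====
theorem map_cles_aux_categories_spec : Claim_equal_map_cles_aux_categories := by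
  intro L _
  unfold Spec_map_cles_aux_categories map_cles_aux_categories map_cles_aux_categories_alt
  rw [pvPaires_eq, pvScan_table L pvCategoriesA [] (by decide) (by simp),
    pvFoldA L pvCategoriesA ([] : List String)]
  simp only [List.nil_append]
  cases (pvCategoriesA.filter (fun p => p.2.any (fun k => L.contains k))).map Prod.fst with
  | nil => rfl
  | cons x xs => simp [List.isEmpty]
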